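-- pv_equiv track=rewrite | github.com/gastonfartek/aoc-2023 | day15/part1.py | solve
-- ===== SOURCE A (Python) =====
-- def solve(input_str: str):
--   steps = [list(step) for step in input_str.split(',')]
--
--   total = 0
--   for step in steps:
--     current_value = 0
--     for s in step:
--       current_value = ((ord(s) + current_value) * 17) % 256
--
--     total += current_value
--
--   return total
-- ===== SOURCE B (Python) =====
-- def solve(input_str: str):
--   # Closed form per step: HASH(step) = (sum of ord(c)*17^(n-j)) % 256, and
--   # 17^k = 16*k + 1 (mod 256), so one weighted sum and a single final mod
--   # replace the per-character rolling (add, *17, %256) recurrence.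
--   total = 0
--   for step in input_str.split(','):
--     s = 0
--     k = len(step)
--     for c in step:
--       s += ord(c) * (16 * k + 1)
--       k -= 1
--     total += s % 256
--   return total
-- ===== Notes on version B (the rewrite author's own statement) =====
-- stated objective: alternative
-- what changed: Replaces the per-character rolling recurrence ((ord+cur)*17)%256 by a closed-form weighted sum per step using 17^k = 16k+1 (mod 256): each character contributes ord(c)*(16*k+1) and a single mod is taken at the end of the step.
import Mathlib
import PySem

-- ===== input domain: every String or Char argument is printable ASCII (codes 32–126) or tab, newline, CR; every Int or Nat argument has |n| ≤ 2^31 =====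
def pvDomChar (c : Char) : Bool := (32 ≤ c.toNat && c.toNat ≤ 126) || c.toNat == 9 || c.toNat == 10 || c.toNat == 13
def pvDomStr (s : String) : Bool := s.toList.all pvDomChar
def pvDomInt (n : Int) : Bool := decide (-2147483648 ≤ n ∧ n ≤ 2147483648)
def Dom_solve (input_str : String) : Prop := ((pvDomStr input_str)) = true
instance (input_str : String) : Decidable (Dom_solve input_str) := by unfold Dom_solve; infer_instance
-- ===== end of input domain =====

-- B replaces the rolling ((ord+cur)*17)%256 recurrence by a closed-form weighted sum per step
-- (weight 16k+1 = 17^k mod 256) with a single mod at the step's end.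


-- ===== PORT A =====
def solve (input_str : String) : Int :=
  let steps := PySem.Chars.splitOn input_str.toList [',']
  steps.foldl (fun total step =>
    total + step.foldl (fun cur c => PySem.Int.mod (((c.toNat : Int) + cur) * 17) 256) 0) 0

-- ===== PORT B =====
def solve_alt (input_str : String) : Int :=
  (PySem.Chars.splitOn input_str.toList [',']).foldl (fun total step =>
    let p := step.foldl (fun (sk : Int × Int) c =>
      (sk.1 + (c.toNat : Int) * (16 * sk.2 + 1), sk.2 - 1)) (0, (step.length : Int))
    total + PySem.Int.mod p.1 256) 0

-- ===== PRECONDITION & SPEC =====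
def Spec_solve (input_str : String) (out : Int) : Prop := out = solve_alt input_str
instance (input_str : String) (out : Int) : Decidable (Spec_solve input_str out) := by unfold Spec_solve; infer_instance

-- ===== CLAIM (what is proved, stated in full; the proofs are below) =====
def Claim_equal_solve : Prop := ∀ (input_str : String), Dom_solve input_str → Spec_solve input_str (solve input_str)

-- ===== LEMMAS AND PROOFS =====

-- Python's % with modulus 256 is Int.emod
theorem pvFmod (a : Int) : PySem.Int.mod a 256 = a.emod 256 := by
  simp only [PySem.Int.mod, Int.fmod_eq_emod]
  norm_num
  rfl

-- A's inner rolling hash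
def pvHash (cs : List Char) (cur : Int) : Int :=
  cs.foldl (fun cur c => PySem.Int.mod (((c.toNat : Int) + cur) * 17) 256) cur

-- the exact polynomial Σ ord(c_j) * 17^(n-j)
def pvPoly : List Char → Int
  | [] => 0
  | c :: l => (c.toNat : Int) * 17 ^ (l.length + 1) + pvPoly l

-- the linear-weight polynomial Σ ord(c_j) * (16*(k-j)+1) starting from counter k
def pvLin : List Char → Int → Int
  | [], _ => 0
  | c :: l, k => (c.toNat : Int) * (16 * k + 1) + pvLin l (k - 1)

theorem pvLin_fold (l : List Char) (s k : Int) :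
    (l.foldl (fun (sk : Int × Int) c =>
      (sk.1 + (c.toNat : Int) * (16 * sk.2 + 1), sk.2 - 1)) (s, k)).1 = s + pvLin l k := by
  induction l generalizing s k with
  | nil => simp [pvLin]
  | cons c l ih => simp [pvLin, ih]; ring

theorem pvHash_modeq (l : List Char) (cur : Int) :
    Int.ModEq 256 (pvHash l cur) (cur * 17 ^ l.length + pvPoly l) := by
  induction l generalizing cur with
  | nil => simp [pvHash, pvPoly]
  | cons c l ih =>
    have h1 : pvHash (c :: l) cur
        = pvHash l (PySem.Int.mod (((c.toNat : Int) + cur) * 17) 256) := rfl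
    rw [h1]
    refine (ih _).trans ?_
    have hm : Int.ModEq 256 (PySem.Int.mod (((c.toNat : Int) + cur) * 17) 256)
        (((c.toNat : Int) + cur) * 17) := by
      simp [Int.ModEq]
    refine ((hm.mul_right (17 ^ l.length)).add_right (pvPoly l)).trans ?_
    have : ((c.toNat : Int) + cur) * 17 * 17 ^ l.length + pvPoly l
        = cur * 17 ^ (l.length + 1) + ((c.toNat : Int) * 17 ^ (l.length + 1) + pvPoly l) := by
      ring
    rw [this]
    simp [pvPoly]

-- a nonempty rolling hash is already reduced mod 256
theorem pvHash_selfmod (c : Char) (l : List Char) (cur : Int) :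
    pvHash (c :: l) cur = (pvHash (c :: l) cur).emod 256 := by
  induction l generalizing c cur with
  | nil =>
    simp only [pvHash, List.foldl_cons, List.foldl_nil, pvFmod]
    exact (Int.emod_emod_of_dvd _ dvd_rfl).symm
  | cons d l ih => exact ih d _

-- 17^k ≡ 16k+1 (mod 256)
theorem pvPow17 (k : Nat) : Int.ModEq 256 (17 ^ k) (16 * (k : Int) + 1) := by
  induction k with
  | zero => simp
  | succ k ih =>
    have h := ih.mul_right 17
    refine (by rw [pow_succ] : (17:Int) ^ (k+1) = 17 ^ k * 17) ▸ h.trans ?_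
    have : (16 * (k : Int) + 1) * 17 = 256 * k + (16 * ((k : Int) + 1) + 1) := by ring
    rw [this]
    push_cast
    exact (Int.modEq_iff_dvd.mpr ⟨-k, by ring⟩)

theorem pvLin_modeq (l : List Char) :
    Int.ModEq 256 (pvLin l l.length) (pvPoly l) := by
  induction l with
  | nil => rfl
  | cons c l ih =>
    have h1 : pvLin (c :: l) (c :: l).length
        = (c.toNat : Int) * (16 * ((l.length : Int) + 1) + 1) + pvLin l l.length := by
      simp [pvLin]
    rw [h1]
    have hw : Int.ModEq 256 ((c.toNat : Int) * (16 * ((l.length : Int) + 1) + 1))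
        ((c.toNat : Int) * 17 ^ (l.length + 1)) := by
      have := (pvPow17 (l.length + 1)).symm.mul_left (c.toNat : Int)
      simpa using this
    exact (hw.add ih).trans (by rw [pvPoly])

theorem pvStep_eq (step : List Char) :
    pvHash step 0
      = PySem.Int.mod ((step.foldl (fun (sk : Int × Int) c =>
          (sk.1 + (c.toNat : Int) * (16 * sk.2 + 1), sk.2 - 1)) (0, (step.length : Int))).1) 256 := by
  rw [pvLin_fold, zero_add, pvFmod]
  have hmq : Int.ModEq 256 (pvHash step 0) (pvLin step step.length) := by
    have h := pvHash_modeq step 0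
    rw [zero_mul, zero_add] at h
    exact h.trans (pvLin_modeq step).symm
  cases step with
  | nil => rfl
  | cons c l =>
    rw [pvHash_selfmod c l 0]
    exact hmq

-- ===== VERDICT (by name: the statement is the Claim_ definition above) =====
theorem solve_spec : Claim_equal_solve := by
  intro s _
  unfold Spec_solve solve solve_alt
  refine PySem.List.foldl_congr_mem _ _ _ _ (fun total step _ => ?_)
  rw [show (step.foldl (fun cur c => PySem.Int.mod (((c.toNat : Int) + cur) * 17) 256) 0)
      = pvHash step 0 from rfl, pvStep_eq step]
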